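-- pv_equiv track=rewrite | github.com/Dhanushenoy/BeeMesh | beemesh/launch.py | _partition_axis
-- ===== SOURCE A (Python) =====
-- from typing import Any, Dict, List, Optional
--
-- def _partition_axis(length: int, parts: int) -> List[tuple[int, int]]:
--     """Partition an axis into nearly-equal half-open intervals."""
--
--     base = length // parts
--     remainder = length % parts
--     intervals = []
--     start = 0
--     for index in range(parts):
--         size = base + (1 if index < remainder else 0)
--         end = start + size
--         intervals.append((start, end))
--         start = end
--     return intervals
-- ===== SOURCE B (Python) =====
-- from typing import List
--
-- def _partition_axis(length: int, parts: int) -> List[tuple[int, int]]: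
--     """Partition an axis into nearly-equal half-open intervals (closed form)."""
--     base = length // parts
--     remainder = length % parts
--     return [
--         (index * base + min(index, remainder),
--          (index + 1) * base + min(index + 1, remainder))
--         for index in range(parts)
--     ]
-- ===== Notes on version B (the rewrite author's own statement) =====
-- stated objective: alternative
-- what changed: Each interval is computed independently from its index by the closed form start = i*base + min(i, remainder), as a comprehension, instead of threading a running start accumulator through a loop.
import Mathlib
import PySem

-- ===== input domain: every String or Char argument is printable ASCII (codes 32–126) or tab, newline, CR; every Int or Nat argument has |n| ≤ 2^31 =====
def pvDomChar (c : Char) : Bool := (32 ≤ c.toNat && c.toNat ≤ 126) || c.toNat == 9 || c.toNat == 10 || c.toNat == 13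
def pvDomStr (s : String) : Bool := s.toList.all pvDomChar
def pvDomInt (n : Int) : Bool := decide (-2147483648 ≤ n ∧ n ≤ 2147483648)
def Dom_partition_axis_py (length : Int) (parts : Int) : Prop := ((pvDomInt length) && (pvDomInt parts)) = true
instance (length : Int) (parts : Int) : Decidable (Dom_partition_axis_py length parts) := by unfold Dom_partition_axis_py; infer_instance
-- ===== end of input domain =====

-- B replaces A's running-start accumulator loop by a per-index closed form (alternative decomposition).


-- ===== PORT A =====
def partition_axis_py (length : Int) (parts : Int) : List (Int × Int) :=
  let base := PySem.Int.floordiv length parts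
  let remainder := PySem.Int.mod length parts
  let st := (PySem.List.pyRange 0 parts 1).foldl
    (fun (st : List (Int × Int) × Int) index =>
      let size := base + (if index < remainder then 1 else 0)
      let e := st.2 + size
      (st.1 ++ [(st.2, e)], e)) ([], 0)
  st.1

-- ===== PORT B =====
def partition_axis_py_alt (length : Int) (parts : Int) : List (Int × Int) :=
  let base := PySem.Int.floordiv length parts
  let remainder := PySem.Int.mod length parts
  (PySem.List.pyRange 0 parts 1).map
    (fun index => (index * base + min index remainder,
                   (index + 1) * base + min (index + 1) remainder))

-- ===== PRECONDITION & SPEC =====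
-- Pre_ excludes exactly parts = 0, on which Python's '//' raises ZeroDivisionError.
def Pre_partition_axis_py (length : Int) (parts : Int) : Prop := parts ≠ 0
instance (length : Int) (parts : Int) : Decidable (Pre_partition_axis_py length parts) := by unfold Pre_partition_axis_py; infer_instance
def pvWitness_partition_axis_py : Int × Int := (10, 3)
def Spec_partition_axis_py (length : Int) (parts : Int) (out : List (Int × Int)) : Prop := out = partition_axis_py_alt length parts
instance (length : Int) (parts : Int) (out : List (Int × Int)) : Decidable (Spec_partition_axis_py length parts out) := by unfold Spec_partition_axis_py; infer_instance

-- ===== CLAIM (what is proved, stated in full; the proofs are below) =====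
def Claim_equal_partition_axis_py : Prop := ∀ (length : Int) (parts : Int), Dom_partition_axis_py length parts → Pre_partition_axis_py length parts → Spec_partition_axis_py length parts (partition_axis_py length parts)

-- ===== LEMMAS AND PROOFS =====

-- Loop invariant: starting the fold at start = a*base + min a r reproduces the closed form.
theorem partition_loop_eq (base r : Int) :
    ∀ (n : ℕ) (a b : Int), a ≤ b → (b - a).toNat = n → ∀ (acc : List (Int × Int)),
    (PySem.List.pyRange a b 1).foldl
      (fun (st : List (Int × Int) × Int) index =>
        let size := base + (if index < r then 1 else 0)
        let e := st.2 + size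
        (st.1 ++ [(st.2, e)], e)) (acc, a * base + min a r)
    = (acc ++ (PySem.List.pyRange a b 1).map
        (fun index => (index * base + min index r,
                       (index + 1) * base + min (index + 1) r)),
       b * base + min b r) := by
  intro n
  induction n with
  | zero =>
    intro a b hab h acc
    have hba : b = a := by omega
    subst hba
    rw [PySem.List.pyRange_one_eq_nil le_rfl]
    simp
  | succ n ih =>
    intro a b hab h acc
    have hlt : a < b := by omega
    rw [PySem.List.pyRange_one_cons hlt]
    simp only [List.foldl_cons, List.map_cons]
    have hmin : min a r + (if a < r then 1 else 0) = min (a + 1) r := by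
      simp only [min_def]; split_ifs <;> omega
    have hstep : a * base + min a r + (base + (if a < r then 1 else 0))
        = (a + 1) * base + min (a + 1) r := by rw [add_one_mul, ← hmin]; ring
    rw [hstep]
    rw [ih (a + 1) b (by omega) (by omega)
      (acc ++ [(a * base + min a r, (a + 1) * base + min (a + 1) r)])]
    simp

-- ===== VERDICT (by name: the statement is the Claim_ definition above) =====
theorem partition_axis_py_spec : Claim_equal_partition_axis_py := by
  intro length parts _ hp
  unfold Pre_partition_axis_py at hp
  simp only [Spec_partition_axis_py, partition_axis_py, partition_axis_py_alt]
  by_cases hpos : 0 < parts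
  · have hr : 0 ≤ PySem.Int.mod length parts := PySem.Int.mod_nonneg length hpos
    have h := partition_loop_eq (PySem.Int.floordiv length parts) (PySem.Int.mod length parts)
      (parts - 0).toNat 0 parts (by omega) rfl []
    simp only [zero_mul, zero_add, min_eq_left hr] at h
    rw [h]
    simp
  · have : parts < 0 := by omega
    rw [PySem.List.pyRange_one_eq_nil (by omega)]
    simp
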